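-- pv_equiv track=rewrite | github.com/MrLawrenceAwe/report-generator-api | backend/models.py | normalize_subject_list
-- ===== SOURCE A (Python) =====
-- from typing import Any, Dict, List, Literal, Optional
--
-- def normalize_subject_list(
--     values: Optional[List[str]], field_name: str
-- ) -> List[str]:
--     if not values:
--         return []
--     normalized: List[str] = []
--     for subject in values:
--         cleaned = (subject or "").strip()
--         if not cleaned:
--             raise ValueError(f"{field_name} entries must contain non-whitespace characters.")
--         normalized.append(cleaned)
--     return normalized
-- ===== SOURCE B (Python) =====
-- from typing import List, Optional
--
-- def normalize_subject_list(
--     values: Optional[List[str]], field_name: str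
-- ) -> List[str]:
--     if not values:
--         return []
--     # validate first on the raw entries (an entry strips to empty iff it is
--     # falsy or consists entirely of whitespace), then strip in a second pass
--     if any((not s) or s.isspace() for s in values):
--         raise ValueError(f"{field_name} entries must contain non-whitespace characters.")
--     return [s.strip() for s in values]
-- ===== Notes on version B (the rewrite author's own statement) =====
-- stated objective: simpler
-- what changed: A strips each entry and validates the stripped result inline in one fused loop; B validates first on the raw entries with a whitespace-class test (not s or s.isspace(), no stripping involved) and only then strips in a separate map pass, exploiting that s.strip()=='' iff s is falsy or s.isspace().
import Mathlib
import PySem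

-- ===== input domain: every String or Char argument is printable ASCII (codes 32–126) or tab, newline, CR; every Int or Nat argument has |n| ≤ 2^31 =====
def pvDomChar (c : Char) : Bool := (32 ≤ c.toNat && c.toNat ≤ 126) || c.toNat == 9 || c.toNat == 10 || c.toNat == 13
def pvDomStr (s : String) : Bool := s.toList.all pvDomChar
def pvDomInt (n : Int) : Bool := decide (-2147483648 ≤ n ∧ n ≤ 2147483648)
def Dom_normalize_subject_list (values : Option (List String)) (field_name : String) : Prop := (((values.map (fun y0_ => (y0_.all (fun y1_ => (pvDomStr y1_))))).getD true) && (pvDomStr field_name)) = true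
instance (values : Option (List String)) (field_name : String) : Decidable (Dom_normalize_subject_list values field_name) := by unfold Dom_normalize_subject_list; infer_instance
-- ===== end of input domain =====

-- ===== PORT A =====
-- B validates first with a whitespace-class test on the raw entries, then strips in a separate map pass (objective: simpler).
-- On inputs where Python A raises ValueError (some entry strips to empty), B's Python raises too; Pre_ excludes them and the ports return [] there.
-- loop of A: strip each subject, raise (here: return []) on an empty cleaned value, else append
def pvGoA : List String → List String
  | [] => []
  | subject :: rest =>
    let cleaned := PySem.Str.strip (if subject = "" then "" else subject)
    if cleaned = "" then []   -- raise ValueError: excluded by Pre_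
    else cleaned :: pvGoA rest

def normalize_subject_list (values : Option (List String)) (field_name : String) : List String :=
  match values with
  | none => []
  | some vs => if vs = [] then [] else pvGoA vs

-- ===== PORT B =====
def normalize_subject_list_alt (values : Option (List String)) (field_name : String) : List String :=
  match values with
  | none => []
  | some vs =>
    if vs = [] then [] else
    if vs.any (fun s => (s = "") || PySem.Str.strIsspace s) then []   -- raise ValueError: excluded by Pre_
    else vs.map (fun s => PySem.Str.strip s)

-- ===== PRECONDITION & SPEC =====
-- Pre_ excludes exactly the inputs on which Python A raises ValueError: a non-empty list containing an entry that strips to empty.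
def Pre_normalize_subject_list (values : Option (List String)) (field_name : String) : Prop :=
  ∀ s ∈ values.getD [], PySem.Str.strip s ≠ ""
instance (values : Option (List String)) (field_name : String) : Decidable (Pre_normalize_subject_list values field_name) := by unfold Pre_normalize_subject_list; infer_instance

def pvWitness_normalize_subject_list : Option (List String) × String := (some ["  math ", "art"], "subjects")

def Spec_normalize_subject_list (values : Option (List String)) (field_name : String) (out : List String) : Prop := out = normalize_subject_list_alt values field_name
instance (values : Option (List String)) (field_name : String) (out : List String) : Decidable (Spec_normalize_subject_list values field_name out) := by unfold Spec_normalize_subject_list; infer_instance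

-- ===== CLAIM (what is proved, stated in full; the proofs are below) =====
def Claim_equal_normalize_subject_list : Prop := ∀ (values : Option (List String)) (field_name : String), Dom_normalize_subject_list values field_name → Pre_normalize_subject_list values field_name → Spec_normalize_subject_list values field_name (normalize_subject_list values field_name)

-- ===== LEMMAS AND PROOFS =====
-- a string of whitespace only strips to empty
lemma strip_empty_of_isspace (s : String) (h : PySem.Str.strIsspace s = true) :
    PySem.Str.strip s = "" := by
  have h' : PySem.Chars.strIsspace s.toList = true := by simpa using h
  simp only [PySem.Chars.strIsspace, Bool.and_eq_true, List.all_eq_true] at h'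
  have hl : PySem.Chars.strip s.toList = [] := by
    simp only [PySem.Chars.strip, PySem.Chars.lstrip, PySem.Chars.rstrip]
    rw [List.dropWhile_eq_nil_iff.mpr (fun c hc => h'.2 c hc)]
    simp
  have h2 : (PySem.Str.strip s).toList = [] := by rw [PySem.Str.toList_strip, hl]
  exact String.toList_inj.mp (by simpa using h2)

lemma pvGoA_eq_map (vs : List String) (h : ∀ s ∈ vs, PySem.Str.strip s ≠ "") :
    pvGoA vs = vs.map (fun s => PySem.Str.strip s) := by
  induction vs with
  | nil => rfl
  | cons a rest ih =>
    have ha' : PySem.Str.strip a ≠ "" := h a (by simp)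
    have hg : PySem.Str.strip (if a = "" then "" else a) = PySem.Str.strip a := by
      split_ifs with h0
      · subst h0; rfl
      · rfl
    simp only [pvGoA, hg, List.map, if_neg ha']
    rw [ih (fun s hs => h s (List.mem_cons_of_mem _ hs))]

-- ===== VERDICT (by name: the statement is the Claim_ definition above) =====
theorem normalize_subject_list_spec : Claim_equal_normalize_subject_list := by
  intro values field_name _ hpre0
  unfold Spec_normalize_subject_list normalize_subject_list normalize_subject_list_alt
  match values with
  | none => rfl
  | some vs =>
    have hpre : ∀ s ∈ vs, PySem.Str.strip s ≠ "" := by simpa [Pre_normalize_subject_list] using hpre0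
    simp only
    split_ifs with hnil hany
    · rfl
    · exfalso
      rcases List.any_eq_true.mp hany with ⟨s, hs, hseq⟩
      have hne := hpre s (by simpa using hs)
      rcases Bool.or_eq_true _ _ |>.mp hseq with h0 | hsp
      · exact hne (by rw [of_decide_eq_true h0]; rfl)
      · exact hne (strip_empty_of_isspace s hsp)
    · exact pvGoA_eq_map vs hpre
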